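-- pv_equiv track=rewrite | github.com/geswanel/Algorithms | YaAlgoTrainings/Training5.0/BinSearch/G.py | canBuild
-- ===== SOURCE A (Python) =====
-- def countRow(field, i, j, k):
--     for step in range(k):
--         if field[i][j - step - 1] != '#':
--             return False
--
--     for step in range(2 * k - 1):
--         if field[i][j + step + 1] != '#':
--             return False
--
--     return True
--
-- def countCol(field, i, j, k):
--     for step in range(k):
--         if field[i - step - 1][j] != '#':
--             return False
--
--     for step in range(2 * k - 1):
--         if field[i + step + 1][j] != '#':
--             return False
--
--     return True
--
-- def canBuild(n, m, k, field):
--     for i in range(k, n - 2 * k + 1):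
--         for j in range(k, m - 2 * k + 1):
--             if field[i][j] == '#':
--                 canBeBuild = True
--                 for step in range(k):
--                     if not countRow(field, i + step, j, k) or not countCol(field, i, j + step, k):
--                         canBeBuild = False
--
--                 if canBeBuild:
--                     return True
--
--     return False
-- ===== SOURCE B (Python) =====
-- def _prefix(cells):
--     # prefix counts of '#' over a list of 1-char strings
--     acc = [0]
--     t = 0
--     for ch in cells:
--         t += 1 if ch == '#' else 0
--         acc.append(t)
--     return acc
--
-- def canBuild(n, m, k, field):
--     if k < 1 or n < 3 * k or m < 3 * k:
--         return False
--     H = [_prefix([field[i][x] for x in range(m)]) for i in range(n)]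
--     V = [_prefix([field[y][j] for y in range(n)]) for j in range(m)]
--     for i in range(k, n - 2 * k + 1):
--         for j in range(k, m - 2 * k + 1):
--             if all(H[i + s][j + 2 * k] - H[i + s][j - k] == 3 * k for s in range(k)) and \
--                all(V[j + t][i + 2 * k] - V[j + t][i - k] == 3 * k for t in range(k)):
--                 return True
--     return False
-- ===== Notes on version B (the rewrite author's own statement) =====
-- stated objective: alternative
-- what changed: B precomputes row and column prefix sums of '#' counts once and tests each of the O(k) full cross segments per candidate with a range-count comparison, instead of A's per-candidate O(k^2) cell-by-cell countRow/countCol scans; it trades A's early exit on '.' cells for table precomputation.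
-- outside the precondition, e.g. on canBuild(3, 3, 1, ['..', '..']): A returns False, B raises IndexError
import Mathlib
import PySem

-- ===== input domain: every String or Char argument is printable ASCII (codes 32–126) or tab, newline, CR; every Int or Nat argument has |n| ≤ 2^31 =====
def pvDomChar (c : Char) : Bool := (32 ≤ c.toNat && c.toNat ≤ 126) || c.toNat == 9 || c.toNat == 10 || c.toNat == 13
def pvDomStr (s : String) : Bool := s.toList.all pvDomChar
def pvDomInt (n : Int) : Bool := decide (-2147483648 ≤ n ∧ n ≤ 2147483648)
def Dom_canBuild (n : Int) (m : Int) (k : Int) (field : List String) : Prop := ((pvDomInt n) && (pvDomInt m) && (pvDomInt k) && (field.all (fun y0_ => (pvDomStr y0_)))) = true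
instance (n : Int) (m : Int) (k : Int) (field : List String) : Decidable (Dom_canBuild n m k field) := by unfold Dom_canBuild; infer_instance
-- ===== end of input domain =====

-- B recasts A's per-candidate cell-by-cell countRow/countCol scans as row/column '#' prefix-sum
-- tables with range-count segment checks; the two coverage criteria are proved equivalent (cross_iff).

-- ===== PORT A =====
def countRow (field : List String) (i j k : Int) : Bool :=
  ((PySem.List.pyRange 0 k 1).all fun step =>
      ((PySem.List.pyGet? field i).bind fun row => PySem.Str.pyGet? row (j - step - 1)) == some '#') &&
  ((PySem.List.pyRange 0 (2 * k - 1) 1).all fun step =>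
      ((PySem.List.pyGet? field i).bind fun row => PySem.Str.pyGet? row (j + step + 1)) == some '#')

def countCol (field : List String) (i j k : Int) : Bool :=
  ((PySem.List.pyRange 0 k 1).all fun step =>
      ((PySem.List.pyGet? field (i - step - 1)).bind fun row => PySem.Str.pyGet? row j) == some '#') &&
  ((PySem.List.pyRange 0 (2 * k - 1) 1).all fun step =>
      ((PySem.List.pyGet? field (i + step + 1)).bind fun row => PySem.Str.pyGet? row j) == some '#')

def canBuild (n : Int) (m : Int) (k : Int) (field : List String) : Bool :=
  (PySem.List.pyRange k (n - 2 * k + 1) 1).any fun i =>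
    (PySem.List.pyRange k (m - 2 * k + 1) 1).any fun j =>
      (((PySem.List.pyGet? field i).bind fun row => PySem.Str.pyGet? row j) == some '#') &&
      ((PySem.List.pyRange 0 k 1).foldl
        (fun canBeBuild step =>
          if !(countRow field (i + step) j k) || !(countCol field i (j + step) k) then false
          else canBeBuild)
        true)

-- ===== PORT B =====
-- Source B's _prefix: prefix counts of '#' over a list of characters
def prefixCount (cells : List Char) : List Int :=
  (cells.foldl
    (fun st ch => (st.1 ++ [st.2 + (if ch == '#' then 1 else 0)], st.2 + (if ch == '#' then 1 else 0)))
    ([(0 : Int)], (0 : Int))).1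

def rowCells (field : List String) (i m : Int) : List Char :=
  (PySem.List.pyRange 0 m 1).map fun x =>
    (((PySem.List.pyGet? field i).bind fun r => PySem.Str.pyGet? r x).getD ' ')

def colCells (field : List String) (j n : Int) : List Char :=
  (PySem.List.pyRange 0 n 1).map fun y =>
    (((PySem.List.pyGet? field y).bind fun r => PySem.Str.pyGet? r j).getD ' ')

-- Source B's H and V tables
def buildH (field : List String) (n m : Int) : List (List Int) :=
  (PySem.List.pyRange 0 n 1).map fun i => prefixCount (rowCells field i m)

def buildV (field : List String) (n m : Int) : List (List Int) :=
  (PySem.List.pyRange 0 m 1).map fun j => prefixCount (colCells field j n)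

def canBuild_alt (n : Int) (m : Int) (k : Int) (field : List String) : Bool :=
  if k < 1 || n < 3 * k || m < 3 * k then false
  else
    (PySem.List.pyRange k (n - 2 * k + 1) 1).any fun i =>
      (PySem.List.pyRange k (m - 2 * k + 1) 1).any fun j =>
        ((PySem.List.pyRange 0 k 1).all fun s =>
          PySem.List.pyGetD (PySem.List.pyGetD (buildH field n m) (i + s) []) (j + 2 * k) 0
            - PySem.List.pyGetD (PySem.List.pyGetD (buildH field n m) (i + s) []) (j - k) 0 == 3 * k) &&
        ((PySem.List.pyRange 0 k 1).all fun t =>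
          PySem.List.pyGetD (PySem.List.pyGetD (buildV field n m) (j + t) []) (i + 2 * k) 0
            - PySem.List.pyGetD (PySem.List.pyGetD (buildV field n m) (j + t) []) (i - k) 0 == 3 * k)

-- ===== PRECONDITION & SPEC =====
-- Pre_ excludes k < 1 (A's loop ranges then degenerate or index out of bounds) and, when candidate
-- positions exist, fields shorter than n rows or containing a row shorter than m, on which A may
-- raise IndexError or return a value depending on where '#' happens to lie in the ragged field.
def Pre_canBuild (n : Int) (m : Int) (k : Int) (field : List String) : Prop :=
  (n < 3 * k ∨ m < 3 * k) ∨
  (1 ≤ k ∧ n ≤ (field.length : Int) ∧ ∀ row ∈ field, m ≤ PySem.Str.len row)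
instance (n : Int) (m : Int) (k : Int) (field : List String) : Decidable (Pre_canBuild n m k field) := by
  unfold Pre_canBuild; infer_instance

def pvWitness_canBuild : Int × Int × Int × List String := (3, 3, 1, ["###", "###", "###"])

def Spec_canBuild (n : Int) (m : Int) (k : Int) (field : List String) (out : Bool) : Prop := out = canBuild_alt n m k field
instance (n : Int) (m : Int) (k : Int) (field : List String) (out : Bool) : Decidable (Spec_canBuild n m k field out) := by unfold Spec_canBuild; infer_instance

-- ===== CLAIM (what is proved, stated in full; the proofs are below) =====
def Claim_equal_canBuild : Prop := ∀ (n : Int) (m : Int) (k : Int) (field : List String), Dom_canBuild n m k field → Pre_canBuild n m k field → Spec_canBuild n m k field (canBuild n m k field)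

-- ===== LEMMAS AND PROOFS =====

-- the loop of Source B's _prefix, with its accumulator generalized
theorem prefixFold_general (cells : List Char) (acc : List Int) (t : Int) :
    cells.foldl
      (fun st ch => (st.1 ++ [st.2 + (if ch == '#' then 1 else 0)], st.2 + (if ch == '#' then 1 else 0)))
      (acc, t)
    = (acc ++ (List.range cells.length).map
         (fun b => t + ((cells.take (b + 1)).countP (fun ch => ch == '#') : Int)),
       t + ((cells.countP (fun ch => ch == '#') : Int))) := by
  induction cells generalizing acc t with
  | nil => simp
  | cons ch rest ih =>
    simp only [List.foldl_cons, ih, Prod.mk.injEq]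
    refine ⟨?_, ?_⟩
    · rw [List.length_cons, List.range_succ_eq_map]
      simp only [List.map_cons, List.map_map, List.append_assoc, List.cons_append]
      congr 1
      congr 1
      · simp only [List.take_succ_cons, List.take_zero, List.countP_cons, List.countP_nil]
        split <;> simp
      · simp only [List.nil_append]
        apply List.map_congr_left
        intro b _
        simp only [Function.comp_def, Nat.succ_eq_add_one, List.take_succ_cons, List.countP_cons]
        split <;> push_cast <;> ring
    · simp only [List.countP_cons]
      split <;> push_cast <;> ring

theorem prefixCount_eq (cells : List Char) :
    prefixCount cells
      = (List.range (cells.length + 1)).map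
          (fun b => ((cells.take b).countP (fun ch => ch == '#') : Int)) := by
  unfold prefixCount
  rw [prefixFold_general, List.range_succ_eq_map]
  simp [List.map_map, Function.comp_def]

-- a '#'-count over a segment equals the segment length iff every cell of the segment is '#'
theorem count_seg_iff (cells : List Char) (a d : Nat) (h : a + d ≤ cells.length) :
    ((((cells.take (a + d)).countP (fun ch => ch == '#') : Nat) : Int)
      - (((cells.take a).countP (fun ch => ch == '#') : Nat) : Int) = (d : Int))
    ↔ ∀ q : Nat, q < d → cells[a + q]? = some '#' := by
  have hsplit : cells.take (a + d) = cells.take a ++ (cells.drop a).take d := List.take_add ..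
  set mid := (cells.drop a).take d with hmid
  have hlenmid : mid.length = d := by
    simp [hmid, List.length_take, List.length_drop]; omega
  rw [hsplit, List.countP_append]
  have h1 : ((((cells.take a).countP (fun ch => ch == '#')
        + mid.countP (fun ch => ch == '#') : Nat)) : Int)
      - (((cells.take a).countP (fun ch => ch == '#') : Nat) : Int) = (d : Int)
      ↔ mid.countP (fun ch => ch == '#') = d := by
    constructor <;> intro hx <;> omega
  rw [h1, show d = mid.length from hlenmid.symm, List.countP_eq_length]
  have hgm : ∀ (q : Nat) (hq : q < mid.length), mid[q] = cells[a + q]'(by omega) := by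
    intro q hq
    simp only [hmid, List.getElem_take, List.getElem_drop]
  constructor
  · intro hall q hq
    have hb : a + q < cells.length := by omega
    have h2 := hall (mid[q]'(by omega)) (List.getElem_mem (by omega))
    rw [hgm q (by omega)] at h2
    rw [List.getElem?_eq_getElem hb]
    simpa using h2
  · intro hall ch hch
    rcases List.mem_iff_getElem.mp hch with ⟨q, hq, rfl⟩
    have hb : a + q < cells.length := by omega
    rw [hgm q hq]
    have h4 := hall q (by omega)
    rw [List.getElem?_eq_getElem hb] at h4
    simpa using h4

theorem pref_getD (cells : List Char) (b : Int) (h0 : 0 ≤ b) (h1 : b ≤ (cells.length : Int)) :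
    PySem.List.pyGetD (prefixCount cells) b 0
      = ((cells.take b.toNat).countP (fun ch => ch == '#') : Int) := by
  rw [prefixCount_eq]
  rw [PySem.List.pyGetD_eq_getElem _ _ h0 (by simp [List.length_map, List.length_range]; omega)]
  simp

theorem seg_cells_iff (cells : List Char) (aI kI : Int) (h0 : 0 ≤ aI) (hk : 0 ≤ kI)
    (h1 : aI + kI ≤ (cells.length : Int)) :
    (PySem.List.pyGetD (prefixCount cells) (aI + kI) 0
       - PySem.List.pyGetD (prefixCount cells) aI 0 = kI)
    ↔ ∀ x : Int, aI ≤ x → x < aI + kI → cells[x.toNat]? = some '#' := by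
  rw [pref_getD cells (aI + kI) (by omega) h1, pref_getD cells aI h0 (by omega)]
  rw [show (aI + kI).toNat = aI.toNat + kI.toNat by omega]
  rw [show kI = ((kI.toNat : Nat) : Int) by omega]
  simp only [Int.toNat_natCast]
  rw [count_seg_iff cells aI.toNat kI.toNat (by omega)]
  constructor
  · intro hall x hx1 hx2
    have h2 := hall (x.toNat - aI.toNat) (by omega)
    rwa [show aI.toNat + (x.toNat - aI.toNat) = x.toNat by omega] at h2
  · intro hall q hq
    have h2 := hall (aI + q) (by omega) (by omega)
    rwa [show (aI + q).toNat = aI.toNat + q by omega] at h2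

theorem getMapRange (f : Int → Char) (M : Int) (x : Nat) (hx : (x : Int) < M) :
    ((PySem.List.pyRange 0 M 1).map f)[x]? = some (f x) := by
  rw [PySem.List.pyRange_one, List.map_map]
  rw [List.getElem?_map, List.getElem?_range (by omega : x < (M - 0).toNat)]
  simp

theorem rowCells_good (field : List String) (n m r x : Int)
    (hlen : n ≤ (field.length : Int)) (hrows : ∀ row ∈ field, m ≤ PySem.Str.len row)
    (hr0 : 0 ≤ r) (hrn : r < n) (hx0 : 0 ≤ x) (hxm : x < m) :
    ((rowCells field r m)[x.toNat]? = some '#')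
    ↔ (((PySem.List.pyGet? field r).bind fun a => PySem.List.pyGet? a.toList x) = some '#') := by
  have hr' : r.toNat < field.length := by omega
  have hrow := hrows (field[r.toNat]) (List.getElem_mem hr')
  rw [PySem.Str.len_eq] at hrow
  have hxr : x.toNat < (field[r.toNat]).toList.length := by omega
  have hfx : ((PySem.List.pyGet? field r).bind fun a => PySem.List.pyGet? a.toList x)
      = some ((field[r.toNat]).toList[x.toNat]) := by
    rw [PySem.List.pyGet?_eq_some_getElem field hr0 (by omega)]
    rw [Option.bind_some]
    rw [PySem.List.pyGet?_of_nonneg _ hx0, List.getElem?_eq_getElem hxr]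
  have hrc : (rowCells field r m)[x.toNat]?
      = some (((PySem.List.pyGet? field r).bind fun a => PySem.Str.pyGet? a x).getD ' ') := by
    unfold rowCells
    rw [getMapRange _ _ _ (by omega)]
    rw [Int.toNat_of_nonneg hx0]
  rw [hrc]
  simp only [PySem.Str.pyGet?_eq, PySem.Chars.pyGet?_eq_listPyGet?]
  rw [hfx]
  simp

theorem colCells_good (field : List String) (n m c y : Int)
    (hlen : n ≤ (field.length : Int)) (hrows : ∀ row ∈ field, m ≤ PySem.Str.len row)
    (hy0 : 0 ≤ y) (hyn : y < n) (hc0 : 0 ≤ c) (hcm : c < m) :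
    ((colCells field c n)[y.toNat]? = some '#')
    ↔ (((PySem.List.pyGet? field y).bind fun a => PySem.List.pyGet? a.toList c) = some '#') := by
  have hy' : y.toNat < field.length := by omega
  have hrow := hrows (field[y.toNat]) (List.getElem_mem hy')
  rw [PySem.Str.len_eq] at hrow
  have hcr : c.toNat < (field[y.toNat]).toList.length := by omega
  have hfx : ((PySem.List.pyGet? field y).bind fun a => PySem.List.pyGet? a.toList c)
      = some ((field[y.toNat]).toList[c.toNat]) := by
    rw [PySem.List.pyGet?_eq_some_getElem field hy0 (by omega)]
    rw [Option.bind_some]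
    rw [PySem.List.pyGet?_of_nonneg _ hc0, List.getElem?_eq_getElem hcr]
  have hrc : (colCells field c n)[y.toNat]?
      = some (((PySem.List.pyGet? field y).bind fun a => PySem.Str.pyGet? a c).getD ' ') := by
    unfold colCells
    rw [getMapRange _ _ _ (by omega)]
    rw [Int.toNat_of_nonneg hy0]
  rw [hrc]
  simp only [PySem.Str.pyGet?_eq, PySem.Chars.pyGet?_eq_listPyGet?]
  rw [hfx]
  simp

theorem length_rowCells (field : List String) (i m : Int) :
    (rowCells field i m).length = m.toNat := by
  simp [rowCells, PySem.List.length_pyRange_one]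

theorem length_colCells (field : List String) (j n : Int) :
    (colCells field j n).length = n.toNat := by
  simp [colCells, PySem.List.length_pyRange_one]

-- the combinatorial heart: A's cross checks cover exactly B's two rectangles
theorem cross_iff (G : Int → Int → Prop) (i j k : Int) (hk : 1 ≤ k) :
    (G i j ∧ ∀ s, 0 ≤ s → s < k →
       (((∀ d, 0 ≤ d → d < k → G (i + s) (j - d - 1)) ∧
         (∀ d, 0 ≤ d → d < 2 * k - 1 → G (i + s) (j + d + 1))) ∧
        (∀ d, 0 ≤ d → d < k → G (i - d - 1) (j + s)) ∧
        (∀ d, 0 ≤ d → d < 2 * k - 1 → G (i + d + 1) (j + s))))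
    ↔ ((∀ s, 0 ≤ s → s < k → ∀ x, j - k ≤ x → x < j + 2 * k → G (i + s) x) ∧
       (∀ t, 0 ≤ t → t < k → ∀ y, i - k ≤ y → y < i + 2 * k → G y (j + t))) := by
  constructor
  · rintro ⟨hc, h⟩
    constructor
    · intro s hs0 hsk x hx1 hx2
      rcases lt_trichotomy x j with hx | hx | hx
      · have h2 := (h s hs0 hsk).1.1 (j - x - 1) (by omega) (by omega)
        rwa [show j - (j - x - 1) - 1 = x by omega] at h2
      · subst hx
        rcases eq_or_lt_of_le hs0 with hs | hs
        · rw [← hs]; simpa using hc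
        · have h2 := (h 0 le_rfl (by omega)).2.2 (s - 1) (by omega) (by omega)
          rwa [show i + (s - 1) + 1 = i + s by omega, show x + 0 = x by omega] at h2
      · have h2 := (h s hs0 hsk).1.2 (x - j - 1) (by omega) (by omega)
        rwa [show j + (x - j - 1) + 1 = x by omega] at h2
    · intro t ht0 htk y hy1 hy2
      rcases lt_trichotomy y i with hy | hy | hy
      · have h2 := (h t ht0 htk).2.1 (i - y - 1) (by omega) (by omega)
        rwa [show i - (i - y - 1) - 1 = y by omega] at h2
      · subst hy
        rcases eq_or_lt_of_le ht0 with ht | ht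
        · rw [← ht]; simpa using hc
        · have h2 := (h 0 le_rfl (by omega)).1.2 (t - 1) (by omega) (by omega)
          rwa [show j + (t - 1) + 1 = j + t by omega, show y + 0 = y by omega] at h2
      · have h2 := (h t ht0 htk).2.2 (y - i - 1) (by omega) (by omega)
        rwa [show i + (y - i - 1) + 1 = y by omega] at h2
  · rintro ⟨hr, hc⟩
    refine ⟨?_, fun s hs0 hsk => ⟨⟨?_, ?_⟩, ?_, ?_⟩⟩
    · have h2 := hr 0 le_rfl (by omega) j (by omega) (by omega)
      simpa using h2
    · intro d hd0 hdk
      exact hr s hs0 hsk (j - d - 1) (by omega) (by omega)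
    · intro d hd0 hdk
      exact hr s hs0 hsk (j + d + 1) (by omega) (by omega)
    · intro d hd0 hdk
      exact hc s hs0 hsk (i - d - 1) (by omega) (by omega)
    · intro d hd0 hdk
      exact hc s hs0 hsk (i + d + 1) (by omega) (by omega)

-- B's per-candidate test, as a proposition about the cells of the two rectangles
theorem hB_iff (field : List String) (n m k i j : Int) (hk : 1 ≤ k)
    (hlen : n ≤ (field.length : Int)) (hrows : ∀ row ∈ field, m ≤ PySem.Str.len row)
    (hi : k ≤ i ∧ i < n - 2 * k + 1) (hj : k ≤ j ∧ j < m - 2 * k + 1) :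
    ((((PySem.List.pyRange 0 k 1).all fun s =>
          PySem.List.pyGetD (PySem.List.pyGetD (buildH field n m) (i + s) []) (j + 2 * k) 0
            - PySem.List.pyGetD (PySem.List.pyGetD (buildH field n m) (i + s) []) (j - k) 0 == 3 * k) &&
        ((PySem.List.pyRange 0 k 1).all fun t =>
          PySem.List.pyGetD (PySem.List.pyGetD (buildV field n m) (j + t) []) (i + 2 * k) 0
            - PySem.List.pyGetD (PySem.List.pyGetD (buildV field n m) (j + t) []) (i - k) 0 == 3 * k)) = true)
    ↔ ((∀ s, 0 ≤ s → s < k → ∀ x, j - k ≤ x → x < j + 2 * k →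
          ((PySem.List.pyGet? field (i + s)).bind fun a => PySem.List.pyGet? a.toList x) = some '#') ∧
       (∀ t, 0 ≤ t → t < k → ∀ y, i - k ≤ y → y < i + 2 * k →
          ((PySem.List.pyGet? field y).bind fun a => PySem.List.pyGet? a.toList (j + t)) = some '#')) := by
  simp only [Bool.and_eq_true, List.all_eq_true, PySem.List.mem_pyRange_one, and_imp, beq_iff_eq]
  apply and_congr
  · refine forall_congr' fun s => ?_
    refine imp_congr_right fun hs0 => ?_
    refine imp_congr_right fun hsk => ?_
    rw [buildH, PySem.List.pyGetD_map_pyRange_of_nonneg _ n _ _ (by omega) (by omega)]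
    rw [show j + 2 * k = (j - k) + 3 * k by ring]
    rw [seg_cells_iff (rowCells field (i + s) m) (j - k) (3 * k) (by omega) (by omega)
          (by rw [length_rowCells]; omega)]
    refine forall_congr' fun x => ?_
    refine imp_congr_right fun hx1 => ?_
    refine imp_congr_right fun hx2 => ?_
    rw [rowCells_good field n m (i + s) x hlen hrows (by omega) (by omega) (by omega) (by omega)]
  · refine forall_congr' fun t => ?_
    refine imp_congr_right fun ht0 => ?_
    refine imp_congr_right fun htk => ?_
    rw [buildV, PySem.List.pyGetD_map_pyRange_of_nonneg _ m _ _ (by omega) (by omega)]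
    rw [show i + 2 * k = (i - k) + 3 * k by ring]
    rw [seg_cells_iff (colCells field (j + t) n) (i - k) (3 * k) (by omega) (by omega)
          (by rw [length_colCells]; omega)]
    refine forall_congr' fun y => ?_
    refine imp_congr_right fun hy1 => ?_
    refine imp_congr_right fun hy2 => ?_
    rw [colCells_good field n m (j + t) y hlen hrows (by omega) (by omega) (by omega) (by omega)]

-- ===== VERDICT (by name: the statement is the Claim_ definition above) =====
theorem canBuild_spec : Claim_equal_canBuild := by
  intro n m k field _hdom hpre
  unfold Spec_canBuild
  by_cases htriv : n < 3 * k ∨ m < 3 * k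
  · have hB : canBuild_alt n m k field = false := by
      unfold canBuild_alt
      rw [if_pos (by simp; omega)]
    rw [hB]
    rcases htriv with h | h
    · unfold canBuild
      rw [PySem.List.pyRange_one_eq_nil (by omega : n - 2 * k + 1 ≤ k)]
      simp
    · unfold canBuild
      rw [PySem.List.pyRange_one_eq_nil (by omega : m - 2 * k + 1 ≤ k)]
      simp
  · push Not at htriv
    obtain ⟨hn3, hm3⟩ := htriv
    rcases hpre with h | ⟨hk, hlen, hrows⟩
    · rcases h with h | h <;> omega
    unfold canBuild canBuild_alt
    rw [if_neg (by simp; omega)]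
    refine PySem.List.any_congr_mem ?_
    intro i hi
    rw [PySem.List.mem_pyRange_one] at hi
    beta_reduce
    refine PySem.List.any_congr_mem ?_
    intro j hj
    rw [PySem.List.mem_pyRange_one] at hj
    beta_reduce
    rw [Bool.eq_iff_iff]
    rw [hB_iff field n m k i j hk hlen hrows hi hj]
    rw [← cross_iff
          (fun r x => ((PySem.List.pyGet? field r).bind fun a => PySem.List.pyGet? a.toList x) = some '#')
          i j k hk]
    rw [PySem.List.foldl_if_false_eq]
    simp [countRow, countCol, PySem.List.mem_pyRange_one]
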